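-- pv_equiv track=rewrite | github.com/jackstellwagen/Random_Projects | RSA.py | word_to_int
-- ===== SOURCE A (Python) =====
-- def word_to_int(word): #just for testing
--     alphabet = [" ", "a", "b", "c", "d", "e", "f", "g", "h", "i", "j",\
--             "k", "l","m", "n","o","p","q","r","s","t","u","v","w","x","y","z"]
--
--     c_list = list(word)
--     c_list.reverse()
--
--     place = 1
--     decimal = 0
--     for i in range(len(c_list)):
--         decimal += place * (alphabet.index(c_list[i]))
--         place *= 27
--     return decimal
-- ===== SOURCE B (Python) =====
-- def word_to_int(word):
--     alphabet = [" ", "a", "b", "c", "d", "e", "f", "g", "h", "i", "j",\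
--             "k", "l","m", "n","o","p","q","r","s","t","u","v","w","x","y","z"]
--     decimal = 0
--     for c in word:
--         decimal = decimal * 27 + alphabet.index(c)
--     return decimal
-- ===== Notes on version B (the rewrite author's own statement) =====
-- stated objective: simpler
-- what changed: Replaces the reverse-and-carry-a-place-multiplier loop with a single forward Horner fold (decimal = decimal*27 + index), dropping the reversal, the range loop and the place variable.
import Mathlib
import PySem

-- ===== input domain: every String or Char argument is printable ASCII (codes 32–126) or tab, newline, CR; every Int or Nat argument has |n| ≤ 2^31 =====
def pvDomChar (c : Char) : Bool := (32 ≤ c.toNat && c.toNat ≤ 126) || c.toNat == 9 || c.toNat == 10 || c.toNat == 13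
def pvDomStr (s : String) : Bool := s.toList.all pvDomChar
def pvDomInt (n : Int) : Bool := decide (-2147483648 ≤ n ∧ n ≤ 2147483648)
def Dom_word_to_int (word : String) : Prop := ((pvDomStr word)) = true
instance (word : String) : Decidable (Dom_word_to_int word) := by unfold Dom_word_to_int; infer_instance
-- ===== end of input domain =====

-- B replaces A's reverse-the-word + place-multiplier loop with a single forward Horner fold (simpler).

def pvAlphabet : List Char :=
  [' ', 'a', 'b', 'c', 'd', 'e', 'f', 'g', 'h', 'i', 'j',
   'k', 'l', 'm', 'n', 'o', 'p', 'q', 'r', 's', 't', 'u', 'v', 'w', 'x', 'y', 'z']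

-- ===== PORT A =====
-- A: c_list = reversed word; loop i over range(len), decimal += place * alphabet.index(c_list[i]); place *= 27.
-- alphabet.index raises ValueError for a char outside the alphabet; Pre_ excludes that, .getD 0 is unreachable inside Pre_.
def word_to_int (word : String) : Int :=
  let c_list := word.toList.reverse
  let st := (PySem.List.pyRange 0 c_list.length 1).foldl
    (fun (st : Int × Int) i =>
      (st.1 + st.2 * (((PySem.List.index? pvAlphabet (PySem.List.pyGetD c_list i ' ')).getD 0 : Nat) : Int),
       st.2 * 27))
    (0, 1)
  st.1

-- ===== PORT B =====
-- B: forward Horner fold over the characters.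
def word_to_int_alt (word : String) : Int :=
  word.toList.foldl
    (fun decimal c => decimal * 27 + (((PySem.List.index? pvAlphabet c).getD 0 : Nat) : Int))
    0

-- ===== PRECONDITION & SPEC =====
-- Pre_ : every character is in A's alphabet; elsewhere Python's list.index raises ValueError.
def Pre_word_to_int (word : String) : Prop := word.toList.all (fun c => c ∈ pvAlphabet) = true
instance (word : String) : Decidable (Pre_word_to_int word) := by unfold Pre_word_to_int; infer_instance
def pvWitness_word_to_int : String := "zebra cat"

def Spec_word_to_int (word : String) (out : Int) : Prop := out = word_to_int_alt word
instance (word : String) (out : Int) : Decidable (Spec_word_to_int word out) := by unfold Spec_word_to_int; infer_instance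

-- ===== CLAIM (what is proved, stated in full; the proofs are below) =====
def Claim_equal_word_to_int : Prop := ∀ (word : String), Dom_word_to_int word → Pre_word_to_int word → Spec_word_to_int word (word_to_int word)

-- ===== LEMMAS AND PROOFS =====

def pvVal (c : Char) : Int := (((PySem.List.index? pvAlphabet c).getD 0 : Nat) : Int)

theorem pvVal_eq (c : Char) : (((PySem.List.index? pvAlphabet c).getD 0 : Nat) : Int) = pvVal c := rfl

theorem pv_horner_shift (l : List Char) (acc : Int) :
    l.foldl (fun d c => d * 27 + pvVal c) acc
      = acc * 27 ^ l.length + l.foldl (fun d c => d * 27 + pvVal c) 0 := by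
  induction l generalizing acc with
  | nil => simp
  | cons a t ih =>
    simp only [List.foldl_cons, List.length_cons]
    rw [ih (acc * 27 + pvVal a), ih (0 * 27 + pvVal a)]
    ring

theorem pv_key (l : List Char) (d p : Int) :
    l.reverse.foldl (fun (st : Int × Int) c => (st.1 + st.2 * pvVal c, st.2 * 27)) (d, p)
      = (d + p * l.foldl (fun d c => d * 27 + pvVal c) 0, p * 27 ^ l.length) := by
  induction l generalizing d p with
  | nil => simp
  | cons a t ih =>
    simp only [List.reverse_cons, List.foldl_append, List.foldl_cons, List.foldl_nil, ih,
      List.length_cons]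
    rw [pv_horner_shift t (0 * 27 + pvVal a), Prod.mk.injEq]
    constructor <;> ring

-- ===== VERDICT (by name: the statement is the Claim_ definition above) =====
theorem word_to_int_spec : Claim_equal_word_to_int := by
  intro word _ _
  show word_to_int word = word_to_int_alt word
  simp only [word_to_int, word_to_int_alt, pvVal_eq]
  rw [PySem.List.foldl_pyRange_zero_pyGetD' word.toList.reverse ' '
      (fun (st : Int × Int) c => (st.1 + st.2 * pvVal c, st.2 * 27)) (0, 1)]
  rw [pv_key word.toList 0 1]
  simp
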